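-- pv_equiv track=rewrite | github.com/blankbits/market-report | text_utils.py | join_lines
-- ===== SOURCE A (Python) =====
-- def join_lines(columns, separator=''):
--     """Joins an arbitrary number of multi-line strings side-by-side splitting on
--     the '\n' character. It pads the ends of lines with ' ' characters as needed
--     to preserve alignment.
--
--     Args:
--         columns: List of multi-line strings to join.
--         separator: Padding inserted between each column.
--     """
--     split_columns = [x.split('\n') for x in columns]
--
--     # Max line width for each input column.
--     widths = [max(x) for x in [[len(y) for y in z] for z in split_columns]]
--
--     result = ''
--     for i in range(max([len(x) for x in split_columns])):
--         for j, column in enumerate(split_columns):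
--             result += ('%-' + str(widths[j] + len(separator)) + 's') % (
--                 '' if i > len(column) - 1 else column[i])
--
--         result += '\n'
--     return result
-- ===== SOURCE B (Python) =====
-- def join_lines(columns, separator=''):
--     """Joins multi-line strings side-by-side (same contract as the original):
--     consumes reversed per-column line stacks row by row and joins the chunks
--     once, instead of indexing each column with a manual bounds check."""
--     pad = len(separator)
--     split_columns = [x.split('\n') for x in columns]
--     widths = [pad + max(len(line) for line in col) for col in split_columns]
--     stacks = [col[::-1] for col in split_columns]  # reversed: pop() is O(1)
--     chunks = []
--     while any(stacks):
--         for stack, w in zip(stacks, widths):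
--             chunks.append((stack.pop() if stack else '').ljust(w))
--         chunks.append('\n')
--     return ''.join(chunks)
-- ===== Notes on version B (the rewrite author's own statement) =====
-- stated objective: alternative
-- what changed: Replaces A's indexed double loop (range over the max row count, enumerate with a manual out-of-range check, repeated string concatenation) by a consuming transposition: each column's lines are reversed into a stack, rows are popped off while any stack is nonempty, and the padded chunks are joined once at the end.
-- outside the precondition, e.g. on join_lines([], ''): A raises ValueError, B returns ''
import Mathlib
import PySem

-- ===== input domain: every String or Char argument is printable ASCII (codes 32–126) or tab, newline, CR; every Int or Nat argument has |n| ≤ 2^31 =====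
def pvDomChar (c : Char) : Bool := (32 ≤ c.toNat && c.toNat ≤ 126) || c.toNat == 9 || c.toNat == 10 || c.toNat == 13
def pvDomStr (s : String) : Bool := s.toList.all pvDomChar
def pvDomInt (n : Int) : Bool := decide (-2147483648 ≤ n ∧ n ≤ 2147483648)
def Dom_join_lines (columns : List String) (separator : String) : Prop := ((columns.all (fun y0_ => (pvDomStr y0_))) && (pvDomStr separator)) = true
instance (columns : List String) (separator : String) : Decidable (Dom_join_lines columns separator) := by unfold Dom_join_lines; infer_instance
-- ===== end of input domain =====

-- B consumes reversed per-column line sts row by row and concatenates the chunks once,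
-- instead of A's indexed double loop with a manual bounds check (objective: alternative/idiomatic).

-- ===== PORT A =====
-- Python's `'%-Ns' % s` (and `str.ljust`): right-pad with spaces to width `w`; never truncates. Exact.
def pyLjustC (s : List Char) (w : Nat) : List Char := s ++ List.replicate (w - s.length) ' '

-- Python's `max` over a list of non-negative ints; exact on nonempty lists.  The only place A
-- reaches it with an EMPTY list is `max([len(x) for x in split_columns])` when `columns = []`,
-- where Python raises ValueError — excluded by `Pre_join_lines` (split('\n') is never empty).
def pyMaxNat (l : List Nat) : Nat := l.foldr max 0

-- Port of A.  `for i in range(...)` → List.range (indices are non-negative Nats, exact);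
-- `enumerate` → zipIdx (pair order swapped, same pairs); `column[i]` sits under the guard
-- `i > len(column) - 1`, so `List.getD i []` is exact there.
def join_lines (columns : List String) (separator : String) : String :=
  let split_columns := columns.map (fun x => PySem.Chars.splitOn x.toList ['\n'])
  let widths := split_columns.map (fun z => pyMaxNat (z.map List.length))
  String.ofList ((List.range (pyMaxNat (split_columns.map List.length))).foldl
    (fun result (i : Nat) =>
      (split_columns.zipIdx.foldl
        (fun r cj =>
          r ++ pyLjustC (if (i : Int) > (cj.1.length : Int) - 1 then [] else cj.1.getD i [])
                (widths.getD cj.2 0 + separator.toList.length))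
        result) ++ ['\n'])
    [])

-- ===== PORT B =====
-- Termination measure for B's `while any(stacks)` loop (stated here because the port cites it).
theorem pvSum_dropLast_le {α : Type} : ∀ (l : List (List α)),
    ((l.map List.dropLast).map List.length).sum ≤ (l.map List.length).sum := by
  intro l
  induction l with
  | nil => simp
  | cons c t ih =>
    simp only [List.map_cons, List.sum_cons]
    have : c.dropLast.length ≤ c.length := by simp [List.length_dropLast]
    omega

theorem pvSum_dropLast_lt {α : Type} : ∀ (l : List (List α)),
    l.any (fun c => !c.isEmpty) = true →
    ((l.map List.dropLast).map List.length).sum < (l.map List.length).sum := by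
  intro l h
  induction l with
  | nil => simp at h
  | cons c t ih =>
    simp only [List.any_cons, Bool.or_eq_true] at h
    simp only [List.map_cons, List.sum_cons]
    rcases h with h | h
    · have hc : c ≠ [] := by simpa using h
      have h1 : c.dropLast.length < c.length := by
        have : c.length ≠ 0 := by simpa [List.length_eq_zero_iff] using hc
        simp [List.length_dropLast]; omega
      have h2 := pvSum_dropLast_le t
      omega
    · have h1 : c.dropLast.length ≤ c.length := by simp [List.length_dropLast]
      have h2 := ih h
      omega

-- B's `while any(stacks): … stack.pop() …` loop: each pass emits one output row (each cell is
-- the last element of its reversed stack, '' for an exhausted column) followed by '\n'.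
def joinRowsC (sts : List (List (List Char))) (widths : List Nat) : List Char :=
  if h : sts.any (fun c => !c.isEmpty) then
    ((sts.zip widths).map (fun p => pyLjustC ((p.1.getLast?).getD []) p.2)).flatten
      ++ '\n' :: joinRowsC (sts.map List.dropLast) widths
  else []
termination_by List.sum (sts.map List.length)
decreasing_by simpa using pvSum_dropLast_lt sts h

def join_lines_alt (columns : List String) (separator : String) : String :=
  let pad := separator.toList.length
  let split_columns := columns.map (fun x => PySem.Chars.splitOn x.toList ['\n'])
  let widths := split_columns.map (fun c => pad + pyMaxNat (c.map List.length))
  String.ofList (joinRowsC (split_columns.map List.reverse) widths)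

-- ===== PRECONDITION & SPEC =====
-- Pre_ excludes only `columns = []`, where Python A raises ValueError (`max()` of an empty
-- sequence); B (naturally) returns "" there.
def Pre_join_lines (columns : List String) (separator : String) : Prop := columns ≠ []
instance (columns : List String) (separator : String) : Decidable (Pre_join_lines columns separator) := by unfold Pre_join_lines; infer_instance

def pvWitness_join_lines : List String × String := (["ab\ncd", "x"], "|")

def Spec_join_lines (columns : List String) (separator : String) (out : String) : Prop := out = join_lines_alt columns separator
instance (columns : List String) (separator : String) (out : String) : Decidable (Spec_join_lines columns separator out) := by unfold Spec_join_lines; infer_instance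

-- ===== CLAIM (what is proved, stated in full; the proofs are below) =====
def Claim_equal_join_lines : Prop := ∀ (columns : List String) (separator : String), Dom_join_lines columns separator → Pre_join_lines columns separator → Spec_join_lines columns separator (join_lines columns separator)

-- ===== LEMMAS AND PROOFS =====

-- Proof-side vocabulary: the line produced for row `i`, and the whole output as rows 0..n-1.
def lineOf (cols : List (List (List Char))) (ws : List Nat) (i : Nat) : List Char :=
  ((cols.zip ws).map (fun p => pyLjustC (p.1.getD i []) p.2)).flatten

def rowsOf (cols : List (List (List Char))) (ws : List Nat) (n : Nat) : List Char :=
  ((List.range n).map (fun i => lineOf cols ws i ++ ['\n'])).flatten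

def ML (cols : List (List (List Char))) : Nat := pyMaxNat (cols.map List.length)

theorem foldl_append_eq {β : Type} (g : β → List Char) :
    ∀ (l : List β) (r : List Char),
      l.foldl (fun acc x => acc ++ g x) r = r ++ (l.map g).flatten := by
  intro l
  induction l with
  | nil => intro r; simp
  | cons x t ih => intro r; simp [ih, List.append_assoc]

theorem cellA_eq (c : List (List Char)) (i : Nat) :
    (if (i : Int) > (c.length : Int) - 1 then ([] : List Char) else c.getD i []) = c.getD i [] := by
  split
  · next h =>
    have hlen : c.length ≤ i := by omega
    rw [List.getD_eq_default _ _ hlen]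
  · rfl

theorem getLast?_getD_reverse {α : Type} (c : List α) (d : α) :
    (c.reverse.getLast?).getD d = c.getD 0 d := by
  rw [List.getLast?_reverse]
  cases c <;> simp [List.getD]

theorem ML_eq_zero_iff (cols : List (List (List Char))) :
    ML cols = 0 ↔ ∀ c ∈ cols, c = [] := by
  induction cols with
  | nil => simp [ML, pyMaxNat]
  | cons c t ih =>
    simp only [ML, pyMaxNat, List.map_cons, List.foldr_cons, Nat.max_eq_zero_iff,
      List.mem_cons, forall_eq_or_imp, List.length_eq_zero_iff]
    constructor
    · rintro ⟨h1, h2⟩; exact ⟨h1, (ih.mp h2)⟩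
    · rintro ⟨h1, h2⟩; exact ⟨h1, ih.mpr h2⟩

theorem ML_tail (cols : List (List (List Char))) :
    ML (cols.map List.tail) = ML cols - 1 := by
  induction cols with
  | nil => rfl
  | cons c t ih =>
    simp only [ML, pyMaxNat, List.map_cons, List.foldr_cons, List.length_tail] at *
    omega

theorem any_reverse_eq (cols : List (List (List Char))) :
    (cols.map List.reverse).any (fun c => !c.isEmpty) = cols.any (fun c => !c.isEmpty) := by
  simp [List.any_map, Function.comp_def]

theorem any_of_ML_pos (cols : List (List (List Char))) (h : 0 < ML cols) :
    (cols.map List.reverse).any (fun c => !c.isEmpty) = true := by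
  rw [any_reverse_eq]
  by_contra hfalse
  have hall : ∀ c ∈ cols, c = [] := by
    intro c hc
    have := (List.any_eq_false (l := cols) (p := fun c => !c.isEmpty)).mp
      (Bool.eq_false_iff.mpr hfalse) c hc
    simpa [List.isEmpty_iff] using this
  have := (ML_eq_zero_iff cols).mpr hall
  omega

theorem zip_map_self {γ : Type} (cols : List γ) (g : γ → Nat) :
    cols.zip (cols.map g) = cols.map (fun c => (c, g c)) := by
  simpa using (List.zip_map' (f := id) (g := g) (l := cols))

theorem zipIdx_map_getD {γ : Type} (g : List (List Char) → Nat → γ)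
    (wf : List (List Char) → Nat) :
    ∀ (cs : List (List (List Char))) (W : List Nat) (k : Nat), W.drop k = cs.map wf →
      (cs.zipIdx k).map (fun p => g p.1 (W.getD p.2 0)) = cs.map (fun c => g c (wf c)) := by
  intro cs
  induction cs with
  | nil => intro W k _; simp
  | cons c t ih =>
    intro W k h
    have hget : W.getD k 0 = wf c := by
      have h0 : (W.drop k).getD 0 0 = wf c := by rw [h]; rfl
      rw [List.getD_eq_getElem?_getD] at *
      rw [List.getElem?_drop] at h0
      simpa using h0
    have hdrop : W.drop (k + 1) = t.map wf := by
      have := congrArg List.tail h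
      simpa [List.tail_drop] using this
    simp only [List.zipIdx_cons, List.map_cons, hget, ih W (k + 1) hdrop]

theorem lineOf_succ (cols : List (List (List Char))) (ws : List Nat) (i : Nat) :
    lineOf cols ws (i + 1) = lineOf (cols.map List.tail) ws i := by
  simp only [lineOf, List.zip_map_left, List.map_map]
  refine congrArg List.flatten (List.map_congr_left ?_)
  intro p _
  simp [Prod.map]

theorem row_zero (cols : List (List (List Char))) (ws : List Nat) :
    (((cols.map List.reverse).zip ws).map
        (fun p => pyLjustC ((p.1.getLast?).getD []) p.2)).flatten = lineOf cols ws 0 := by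
  simp only [lineOf, List.zip_map_left, List.map_map]
  refine congrArg List.flatten (List.map_congr_left ?_)
  rintro ⟨c, w⟩ _
  simp only [Function.comp_def, Prod.map_fst, Prod.map_snd, id_eq]
  rw [getLast?_getD_reverse]

theorem rowsOf_succ (cols : List (List (List Char))) (ws : List Nat) (n : Nat) :
    rowsOf cols ws (n + 1) = (lineOf cols ws 0 ++ ['\n']) ++ rowsOf (cols.map List.tail) ws n := by
  simp only [rowsOf, List.range_succ_eq_map, List.map_cons, List.map_map, List.flatten_cons]
  congr 1
  refine congrArg List.flatten (List.map_congr_left ?_)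
  intro i _
  simp [Function.comp, lineOf_succ]

theorem joinRows_eq : ∀ (n : Nat) (cols : List (List (List Char))) (ws : List Nat),
    ML cols = n → joinRowsC (cols.map List.reverse) ws = rowsOf cols ws n := by
  intro n
  induction n with
  | zero =>
    intro cols ws h
    have hall := (ML_eq_zero_iff cols).mp h
    have hany : (cols.map List.reverse).any (fun c => !c.isEmpty) = false := by
      rw [any_reverse_eq]
      simp only [List.any_eq_false]
      intro c hc
      simp [hall c hc]
    rw [joinRowsC.eq_def]
    simp [hany, rowsOf]
  | succ n ih =>
    intro cols ws h
    have hany : (cols.map List.reverse).any (fun c => !c.isEmpty) = true :=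
      any_of_ML_pos cols (by omega)
    rw [joinRowsC.eq_def]
    simp only [hany, dite_true]
    have hmap : (cols.map List.reverse).map List.dropLast = (cols.map List.tail).map List.reverse := by
      simp only [List.map_map]
      exact List.map_congr_left (fun c _ => by simp [Function.comp])
    have htail : ML (cols.map List.tail) = n := by rw [ML_tail]; omega
    rw [hmap, ih (cols.map List.tail) ws htail, row_zero, rowsOf_succ cols ws n]
    simp [List.append_assoc]

theorem joinA_eq (columns : List String) (separator : String) :
    join_lines columns separator =
      String.ofList (rowsOf (columns.map (fun x => PySem.Chars.splitOn x.toList ['\n']))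
        ((columns.map (fun x => PySem.Chars.splitOn x.toList ['\n'])).map
          (fun c => separator.toList.length + pyMaxNat (c.map List.length)))
        (ML (columns.map (fun x => PySem.Chars.splitOn x.toList ['\n'])))) := by
  unfold join_lines
  set cs := columns.map (fun x => PySem.Chars.splitOn x.toList ['\n']) with hcs
  set pad := separator.toList.length with hpad
  set wf : List (List Char) → Nat := fun z => pyMaxNat (z.map List.length) with hwf
  refine congrArg String.ofList ?_
  have hinner : ∀ (i : Nat) (r : List Char),
      cs.zipIdx.foldl (fun r cj =>
          r ++ pyLjustC (if (i : Int) > (cj.1.length : Int) - 1 then [] else cj.1.getD i [])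
            ((cs.map wf).getD cj.2 0 + pad)) r
        = r ++ lineOf cs (cs.map (fun c => pad + wf c)) i := by
    intro i r
    rw [foldl_append_eq]
    refine congrArg (r ++ ·) (congrArg List.flatten ?_)
    have hzi := zipIdx_map_getD
      (g := fun c w => pyLjustC (if (i : Int) > (c.length : Int) - 1 then [] else c.getD i [])
        (w + pad)) (wf := wf) cs (cs.map wf) 0 (by simp)
    calc (cs.zipIdx 0).map (fun p =>
            pyLjustC (if (i : Int) > (p.1.length : Int) - 1 then [] else p.1.getD i [])
              ((cs.map wf).getD p.2 0 + pad))
        = cs.map (fun c =>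
            pyLjustC (if (i : Int) > (c.length : Int) - 1 then [] else c.getD i [])
              (wf c + pad)) := hzi
      _ = cs.map (fun c => pyLjustC (c.getD i []) (pad + wf c)) := by
            refine List.map_congr_left (fun c _ => ?_)
            rw [cellA_eq, Nat.add_comm]
      _ = (cs.zip (cs.map (fun c => pad + wf c))).map (fun p => pyLjustC (p.1.getD i []) p.2) := by
            rw [zip_map_self, List.map_map]
            simp [hcs, Function.comp_def]
  have hfold : (List.range (pyMaxNat (cs.map List.length))).foldl
      (fun result (i : Nat) =>
        (cs.zipIdx.foldl (fun r cj =>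
            r ++ pyLjustC (if (i : Int) > (cj.1.length : Int) - 1 then [] else cj.1.getD i [])
              ((cs.map wf).getD cj.2 0 + pad)) result) ++ ['\n']) []
      = (List.range (ML cs)).foldl
        (fun result (i : Nat) => result ++ (lineOf cs (cs.map (fun c => pad + wf c)) i ++ ['\n'])) [] := by
    refine List.foldl_ext _ _ _ ?_
    intro r i _
    rw [hinner i r, List.append_assoc]
  rw [hfold, foldl_append_eq]
  rfl

-- ===== VERDICT (by name: the statement is the Claim_ definition above) =====
theorem join_lines_spec : Claim_equal_join_lines := by
  intro columns separator _ _
  unfold Spec_join_lines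
  rw [joinA_eq]
  exact (congrArg String.ofList (joinRows_eq _ _ _ rfl)).symm
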